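-- pv_equiv track=rewrite | github.com/Yeongbi-Na/STUDY | Python/ex-08-sales-summary-main/sales_summary.py | sales_summary
-- ===== SOURCE A (Python) =====
-- def sales_summary(data):
--     #===== write your code below ====
--     rank=[]
--     product=[]
--     num=[]
--     for i in range(len(data)):
--         if i>=1 and data[i-1][1]==data[i][1]:
--             rank.append(rank[i-1])
--         else:
--             rank.append(i+1)
--         product.append(data[i][0])
--         num.append(data[i][1])
--
--     return list(zip(product,num, rank))
-- ===== SOURCE B (Python) =====
-- def sales_summary(data):
--     # Group-wise: scan each run of equal quantities once, rank = run start index + 1.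
--     out = []
--     s = 0
--     n = len(data)
--     while s < n:
--         q = data[s][1]
--         e = s + 1
--         while e < n and data[e][1] == q:
--             e += 1
--         for j in range(s, e):
--             out.append((data[j][0], data[j][1], s + 1))
--         s = e
--     return out
-- ===== Notes on version B (the rewrite author's own statement) =====
-- stated objective: alternative
-- what changed: A walks element by element keeping three parallel lists and looking back at the previous rank (rank[i-1]) to copy it on ties, then zips the lists; B instead partitions the list into consecutive runs of equal quantity with a two-pointer group scan and emits each whole run at once with rank = run start index + 1, building the output list directly.
import Mathlib
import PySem

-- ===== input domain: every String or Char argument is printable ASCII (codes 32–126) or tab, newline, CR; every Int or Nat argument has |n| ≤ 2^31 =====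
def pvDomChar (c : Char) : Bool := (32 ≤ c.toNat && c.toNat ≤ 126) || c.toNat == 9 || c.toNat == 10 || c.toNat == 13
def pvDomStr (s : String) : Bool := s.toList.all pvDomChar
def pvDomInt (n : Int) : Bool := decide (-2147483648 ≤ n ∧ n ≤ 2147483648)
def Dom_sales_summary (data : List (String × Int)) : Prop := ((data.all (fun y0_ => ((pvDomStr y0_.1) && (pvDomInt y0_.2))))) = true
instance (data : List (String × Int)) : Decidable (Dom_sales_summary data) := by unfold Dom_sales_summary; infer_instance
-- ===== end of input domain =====

-- B replaces A's element-by-element lookback through three parallel lists by a single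
-- group-wise scan over the runs of equal quantities (alternative decomposition, same cost).

-- ===== PORT A =====
-- Literal port of A: index loop over range(len(data)), three appended lists, then zip.
-- The pyGet? … |>.getD defaults are exact: every index used is in range (0 ≤ i < len data,
-- and rank has i elements when rank[i-1] is read with i ≥ 1).
def sales_summary (data : List (String × Int)) : List (String × Int × Int) :=
  let st := (PySem.List.pyRange 0 (data.length : Int) 1).foldl
    (fun (st : List Int × List String × List Int) i =>
      let rank := st.1
      let product := st.2.1
      let num := st.2.2
      let rank :=
        if 1 ≤ i ∧ ((PySem.List.pyGet? data (i - 1)).getD ("", 0)).2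
                    = ((PySem.List.pyGet? data i).getD ("", 0)).2 then
          rank ++ [(PySem.List.pyGet? rank (i - 1)).getD 0]
        else
          rank ++ [i + 1]
      let product := product ++ [((PySem.List.pyGet? data i).getD ("", 0)).1]
      let num := num ++ [((PySem.List.pyGet? data i).getD ("", 0)).2]
      (rank, product, num))
    (([] : List Int), ([] : List String), ([] : List Int))
  st.2.1.zip (st.2.2.zip st.1)

-- ===== PORT B =====
-- Port of Source B's outer loop over runs: the inner 'while e < n and data[e][1] == q' scan is
-- takeWhile on the suffix, the emitting 'for j in range(s, e)' is the map over the run, and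
-- 's = e' is the structural recursion on the rest of the list (same traversal).
def salesGo (s : Nat) : List (String × Int) → List (String × Int × Int)
  | [] => []
  | (p, q) :: rest =>
    let run := (p, q) :: rest.takeWhile (fun r => r.2 == q)
    run.map (fun r => (r.1, r.2, ((s : Int) + 1))) ++
      salesGo (s + run.length) (rest.dropWhile (fun r => r.2 == q))
termination_by l => l.length
decreasing_by
  exact Nat.lt_succ_of_le (List.length_dropWhile_le _ _)

def sales_summary_alt (data : List (String × Int)) : List (String × Int × Int) :=
  salesGo 0 data

-- ===== PRECONDITION & SPEC =====
def Spec_sales_summary (data : List (String × Int)) (out : List (String × Int × Int)) : Prop := out = sales_summary_alt data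
instance (data : List (String × Int)) (out : List (String × Int × Int)) : Decidable (Spec_sales_summary data out) := by unfold Spec_sales_summary; infer_instance

-- ===== CLAIM (what is proved, stated in full; the proofs are below) =====
def Claim_equal_sales_summary : Prop := ∀ (data : List (String × Int)), Dom_sales_summary data → Spec_sales_summary data (sales_summary data)

-- ===== LEMMAS AND PROOFS =====

-- Middle spec: one left-to-right pass producing (product, qty, rank) triples together with the
-- final loop state (previous quantity, current rank).
def midS : List (String × Int) → Nat → Option Int → Int →
    List (String × Int × Int) × Option Int × Int
  | [], _, prev, cur => ([], prev, cur)
  | (p, q) :: t, i, prev, cur =>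
    let r : Int := if prev == some q then cur else (i : Int) + 1
    let rest := midS t (i + 1) (some q) r
    ((p, q, r) :: rest.1, rest.2)

theorem midS_append (l₁ l₂ : List (String × Int)) (i : Nat) (prev : Option Int) (cur : Int) :
    midS (l₁ ++ l₂) i prev cur =
      (( (midS l₁ i prev cur).1 ++
         (midS l₂ (i + l₁.length) (midS l₁ i prev cur).2.1 (midS l₁ i prev cur).2.2).1 ),
       (midS l₂ (i + l₁.length) (midS l₁ i prev cur).2.1 (midS l₁ i prev cur).2.2).2) := by
  induction l₁ generalizing i prev cur with
  | nil => simp [midS]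
  | cons x t ih =>
    obtain ⟨p, q⟩ := x
    simp only [List.cons_append, midS, ih, List.length_cons]
    have : i + 1 + t.length = i + (t.length + 1) := by omega
    simp [this]

theorem midS_length (l : List (String × Int)) (i : Nat) (prev : Option Int) (cur : Int) :
    (midS l i prev cur).1.length = l.length := by
  induction l generalizing i prev cur with
  | nil => simp [midS]
  | cons x t ih => obtain ⟨p, q⟩ := x; simp [midS, ih]

theorem midS_map_fst (l : List (String × Int)) (i : Nat) (prev : Option Int) (cur : Int) :
    (midS l i prev cur).1.map (·.1) = l.map (·.1) := by
  induction l generalizing i prev cur with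
  | nil => simp [midS]
  | cons x t ih => obtain ⟨p, q⟩ := x; simp [midS, ih]

theorem midS_map_snd (l : List (String × Int)) (i : Nat) (prev : Option Int) (cur : Int) :
    (midS l i prev cur).1.map (·.2.1) = l.map (·.2) := by
  induction l generalizing i prev cur with
  | nil => simp [midS]
  | cons x t ih => obtain ⟨p, q⟩ := x; simp [midS, ih]

-- final prev = last quantity (or the initial prev on [])
theorem midS_prev (l : List (String × Int)) (i : Nat) (prev : Option Int) (cur : Int) :
    (midS l i prev cur).2.1 = (l.getLast?.map (·.2)).getD prev := by
  induction l generalizing i prev cur with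
  | nil => simp [midS]
  | cons x t ih =>
    obtain ⟨p, q⟩ := x
    have hstep : (midS ((p, q) :: t) i prev cur).2.1
        = (midS t (i + 1) (some q) (if prev == some q then cur else (i : Int) + 1)).2.1 := rfl
    rw [hstep, ih]
    cases t with
    | nil => simp
    | cons y t' =>
      cases hzl : (y :: t').getLast? with
      | none => simp at hzl
      | some z => simp [hzl]

-- final cur = last emitted rank (on a nonempty list)
theorem midS_cur (l : List (String × Int)) (i : Nat) (prev : Option Int) (cur : Int)
    (hl : l ≠ []) :
    (midS l i prev cur).1.getLast?.map (·.2.2) = some ((midS l i prev cur).2.2) := by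
  induction l generalizing i prev cur with
  | nil => exact absurd rfl hl
  | cons x t ih =>
    obtain ⟨p, q⟩ := x
    cases t with
    | nil => simp [midS]
    | cons y t' =>
      have h1 : (midS ((p, q) :: y :: t') i prev cur).1
          = (p, q, if prev == some q then cur else (i : Int) + 1)
            :: (midS (y :: t') (i + 1) (some q) (if prev == some q then cur else (i : Int) + 1)).1 := rfl
      have h2 : (midS ((p, q) :: y :: t') i prev cur).2.2
          = (midS (y :: t') (i + 1) (some q) (if prev == some q then cur else (i : Int) + 1)).2.2 := rfl
      have hne : (midS (y :: t') (i + 1) (some q) (if prev == some q then cur else (i : Int) + 1)).1 ≠ [] := by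
        intro h
        have := midS_length (y :: t') (i + 1) (some q) (if prev == some q then cur else (i : Int) + 1)
        rw [h] at this; simp at this
      have hlast : ((p, q, if prev == some q then cur else (i : Int) + 1)
          :: (midS (y :: t') (i + 1) (some q) (if prev == some q then cur else (i : Int) + 1)).1).getLast?
          = (midS (y :: t') (i + 1) (some q) (if prev == some q then cur else (i : Int) + 1)).1.getLast? := by
        cases hc : (midS (y :: t') (i + 1) (some q) (if prev == some q then cur else (i : Int) + 1)).1 with
        | nil => exact absurd hc hne
        | cons a t => simp [List.getLast?_cons_cons]
      rw [h1, h2, hlast]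
      exact ih _ _ _ (by simp)

-- zip of the three projections reconstructs the triple list
theorem zip_proj (out : List (String × Int × Int)) :
    (out.map (·.1)).zip ((out.map (·.2.1)).zip (out.map (·.2.2))) = out := by
  induction out with
  | nil => rfl
  | cons x t ih => obtain ⟨p, q, r⟩ := x; simp [ih]

-- A's fold over range(0, m) computes midS on the m-prefix (ranks/products/quantities).
theorem foldA (data : List (String × Int)) (m : Nat) (hm : m ≤ data.length) :
    (PySem.List.pyRange 0 (m : Int) 1).foldl
      (fun (st : List Int × List String × List Int) i =>
        let rank := st.1
        let product := st.2.1
        let num := st.2.2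
        let rank :=
          if 1 ≤ i ∧ ((PySem.List.pyGet? data (i - 1)).getD ("", 0)).2
                      = ((PySem.List.pyGet? data i).getD ("", 0)).2 then
            rank ++ [(PySem.List.pyGet? rank (i - 1)).getD 0]
          else
            rank ++ [i + 1]
        let product := product ++ [((PySem.List.pyGet? data i).getD ("", 0)).1]
        let num := num ++ [((PySem.List.pyGet? data i).getD ("", 0)).2]
        (rank, product, num))
      (([] : List Int), ([] : List String), ([] : List Int))
    = ((midS (data.take m) 0 none 0).1.map (·.2.2),
       (data.take m).map (·.1), (data.take m).map (·.2)) := by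
  induction m with
  | zero =>
    rw [show ((0 : Nat) : Int) = 0 from rfl, PySem.List.pyRange_one_eq_nil le_rfl]
    simp [midS]
  | succ m ih =>
    have hm' : m ≤ data.length := Nat.le_of_succ_le hm
    have hmlt : m < data.length := hm
    have hrange : PySem.List.pyRange 0 ((m + 1 : Nat) : Int) 1
        = PySem.List.pyRange 0 (m : Int) 1 ++ [(m : Int)] := by
      push_cast
      exact PySem.List.pyRange_one_succ_right (by positivity)
    rw [hrange, List.foldl_append, ih hm', List.foldl_cons, List.foldl_nil]
    have hget : PySem.List.pyGet? data (m : Int) = some data[m] := by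
      rw [PySem.List.pyGet?_natCast]
      exact List.getElem?_eq_getElem hmlt
    have htake : data.take (m + 1) = data.take m ++ [data[m]] := by
      rw [List.take_add_one, List.getElem?_eq_getElem hmlt]
      rfl
    have hlen : (data.take m).length = m := by
      simp [List.length_take, Nat.min_eq_left hm']
    -- the appended midS element
    rw [htake, midS_append]
    have hone : ∀ pr c, midS [data[m]] (0 + (data.take m).length) pr c
        = ([(data[m].1, data[m].2, if pr == some data[m].2 then c else (m : Int) + 1)],
           some data[m].2, if pr == some data[m].2 then c else (m : Int) + 1) := by
      intro pr c
      simp [midS, hlen]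
    rw [hone]
    simp only [List.map_append, List.map_cons, List.map_nil, hget, Option.getD_some]
    refine Prod.ext ?_ (Prod.ext rfl rfl)
    -- rank components
    by_cases h0 : m = 0
    · subst h0
      have hpre : (midS (data.take 0) 0 none 0).2.1 = none := by simp [midS]
      have hc : ¬ (1 ≤ ((0 : Nat) : Int) ∧
          ((PySem.List.pyGet? data (((0 : Nat) : Int) - 1)).getD ("", 0)).2
            = data[0].2) := by
        intro h
        have := h.1
        norm_num at this
      rw [if_neg hc, hpre]
      simp [midS]
    · have h1m : 1 ≤ m := Nat.one_le_iff_ne_zero.mpr h0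
      have hm1lt : m - 1 < data.length := by omega
      have hget1 : PySem.List.pyGet? data ((m : Int) - 1) = some data[m - 1] := by
        rw [show (m : Int) - 1 = ((m - 1 : Nat) : Int) from by push_cast [h1m]; omega,
          PySem.List.pyGet?_natCast]
        exact List.getElem?_eq_getElem hm1lt
      have htkne : data.take m ≠ [] := by
        intro h
        have := congrArg List.length h
        rw [hlen] at this
        simp at this
        omega
      have hlastq : (data.take m).getLast? = some data[m - 1] := by
        rw [List.getLast?_eq_getElem?, hlen, List.getElem?_take]
        rw [if_pos (by omega), List.getElem?_eq_getElem hm1lt]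
      have hprev : (midS (data.take m) 0 none 0).2.1 = some data[m - 1].2 := by
        rw [midS_prev, hlastq]
        rfl
      have hR : (midS (data.take m) 0 none 0).1.map (·.2.2) ≠ [] := by
        intro h
        have := congrArg List.length h
        rw [List.length_map, midS_length, hlen] at this
        simp at this
        omega
      have hcur : PySem.List.pyGet? ((midS (data.take m) 0 none 0).1.map (·.2.2)) ((m : Int) - 1)
          = some (midS (data.take m) 0 none 0).2.2 := by
        rw [show (m : Int) - 1 = ((m - 1 : Nat) : Int) from by push_cast [h1m]; omega,
          PySem.List.pyGet?_natCast]
        have hlenR : ((midS (data.take m) 0 none 0).1.map (·.2.2)).length = m := by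
          rw [List.length_map, midS_length, hlen]
        rw [show m - 1 = ((midS (data.take m) 0 none 0).1.map (·.2.2)).length - 1 from by omega,
          ← List.getLast?_eq_getElem?, List.getLast?_map]
        rw [midS_cur _ _ _ _ htkne]
      by_cases hqq : data[m - 1].2 = data[m].2
      · have hcnd : 1 ≤ (m : Int) ∧
            ((PySem.List.pyGet? data ((m : Int) - 1)).getD ("", 0)).2
              = data[m].2 := by
          refine ⟨by exact_mod_cast h1m, ?_⟩
          rw [hget1]
          simpa using hqq
        rw [if_pos hcnd, hcur, hprev]
        simp [hqq]
      · have hcnd : ¬ (1 ≤ (m : Int) ∧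
            ((PySem.List.pyGet? data ((m : Int) - 1)).getD ("", 0)).2
              = data[m].2) := by
          intro h
          apply hqq
          have := h.2
          rw [hget1] at this
          simpa using this
        rw [if_neg hcnd, hprev]
        have : (some data[m - 1].2 == some data[m].2) = false := by simp [hqq]
        rw [this]
        simp

-- run lemma: starting with prev = the run's quantity and current rank r, midS emits the whole
-- run with rank r and continues after it with the same state.
theorem midS_run (t : List (String × Int)) (i : Nat) (q : Int) (r : Int) :
    (midS t i (some q) r).1 =
      (t.takeWhile (fun x => x.2 == q)).map (fun x => (x.1, x.2, r)) ++
      (midS (t.dropWhile (fun x => x.2 == q))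
            (i + (t.takeWhile (fun x => x.2 == q)).length) (some q) r).1 := by
  induction t generalizing i with
  | nil => simp [midS]
  | cons x t' ih =>
    obtain ⟨p', q'⟩ := x
    by_cases h : q' = q
    · subst h
      have hstep : (midS ((p', q') :: t') i (some q') r).1
          = (p', q', r) :: (midS t' (i + 1) (some q') r).1 := by
        simp [midS]
      have hTW : ((p', q') :: t').takeWhile (fun x => x.2 == q')
          = (p', q') :: t'.takeWhile (fun x => x.2 == q') := by
        simp
      have hDW : ((p', q') :: t').dropWhile (fun x => x.2 == q')
          = t'.dropWhile (fun x => x.2 == q') := by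
        simp
      rw [hstep, ih (i + 1), hTW, hDW, List.map_cons]
      have harg : i + ((p', q') :: t'.takeWhile (fun x => x.2 == q')).length
          = i + 1 + (t'.takeWhile (fun x => x.2 == q')).length := by
        simp; omega
      rw [harg]
      simp
    · have hb : ((q' : Int) == q) = false := by simp [h]
      simp [hb]

-- B's run recursion computes midS whenever prev differs from the head quantity.
theorem salesGo_eq_midS (n : Nat) (l : List (String × Int)) (hn : l.length ≤ n)
    (s : Nat) (prev : Option Int) (cur : Int)
    (h : ∀ p q t, l = (p, q) :: t → (prev == some q) = false) :
    salesGo s l = (midS l s prev cur).1 := by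
  induction n generalizing l s prev cur with
  | zero =>
    have : l = [] := List.eq_nil_of_length_eq_zero (Nat.le_zero.mp hn)
    subst this; simp [salesGo, midS]
  | succ n ih =>
    match l with
    | [] => simp [salesGo, midS]
    | (p, q) :: rest =>
      have hprev := h p q rest rfl
      have hmid : (midS ((p, q) :: rest) s prev cur).1
          = (p, q, (s : Int) + 1) :: (midS rest (s + 1) (some q) ((s : Int) + 1)).1 := by
        simp [midS, hprev]
      rw [salesGo, hmid, midS_run rest (s + 1) q ((s : Int) + 1)]
      have hrec : salesGo (s + ((rest.takeWhile (fun x => x.2 == q)).length + 1))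
            (rest.dropWhile (fun x => x.2 == q))
          = (midS (rest.dropWhile (fun x => x.2 == q))
              (s + 1 + (rest.takeWhile (fun x => x.2 == q)).length) (some q) ((s : Int) + 1)).1 := by
        have harg : s + ((rest.takeWhile (fun x => x.2 == q)).length + 1)
            = s + 1 + (rest.takeWhile (fun x => x.2 == q)).length := by omega
        rw [harg]
        apply ih
        · have h1 := List.length_dropWhile_le (fun x => x.2 == q) rest
          simp at hn
          omega
        · intro p' q' t' hd
          have hhead := List.head?_dropWhile_not (fun x => x.2 == q) rest
          rw [hd] at hhead
          simp only [List.head?_cons] at hhead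
          have hne : q' ≠ q := by simpa using hhead
          have hne' : q ≠ q' := fun e => hne e.symm
          simp [hne']
      simp only [List.map_cons, List.length_cons, List.cons_append]
      rw [hrec]

-- ===== VERDICT (by name: the statement is the Claim_ definition above) =====
theorem sales_summary_spec : Claim_equal_sales_summary := by
  intro data _
  show sales_summary data = sales_summary_alt data
  unfold sales_summary sales_summary_alt
  rw [foldA data data.length le_rfl]
  simp only [List.take_length]
  rw [← midS_map_fst data 0 none 0, ← midS_map_snd data 0 none 0, zip_proj]
  exact (salesGo_eq_midS data.length data le_rfl 0 none 0 (by intro p q t h; rfl)).symm
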